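-- pv_equiv track=rewrite | github.com/shalgrim/advent-of-code | python/2021/day17_2.py | get_xs_that_work_for_tick
-- ===== SOURCE A (Python) =====
-- def get_xs_that_work_for_tick(tick, minx, maxx, left, right):
--     """
--     Find initial x velocities that put x in range at tick
--     :param tick: number of ticks
--     :param minx: lowest possible initial x velocity
--     :param maxx: highest possible x velocity
--     :return: answer - all possible initial x velocities that put x in range at time tick
--     """
--     answer = []
--     for init_x in range(minx, maxx + 1):
--         xpos = 0
--         xvel = init_x
--         for _ in range(tick):
--             xpos += xvel
--             xvel = max(0, xvel - 1)
--         if left <= xpos <= right: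
--             answer.append(init_x)
--
--     return answer
-- ===== SOURCE B (Python) =====
-- def get_xs_that_work_for_tick(tick, minx, maxx, left, right):
--     """Closed-form x position per initial velocity (drag stops x at 0), O(maxx-minx) total."""
--     def xpos(v):
--         if tick <= 0:
--             return 0
--         if v <= 0:
--             return v
--         if v >= tick:
--             return tick * v - tick * (tick - 1) // 2
--         return v * (v + 1) // 2
--     return [v for v in range(minx, maxx + 1) if left <= xpos(v) <= right]
-- ===== Notes on version B (the rewrite author's own statement) =====
-- stated objective: alternative
-- what changed: Replaced the per-velocity tick-step simulation of the inner loop by a closed-form triangular-sum formula for the x position at time tick (cases v<=0, v>=tick, 0<v<tick), keeping only the single pass over the velocity range.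
import Mathlib
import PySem

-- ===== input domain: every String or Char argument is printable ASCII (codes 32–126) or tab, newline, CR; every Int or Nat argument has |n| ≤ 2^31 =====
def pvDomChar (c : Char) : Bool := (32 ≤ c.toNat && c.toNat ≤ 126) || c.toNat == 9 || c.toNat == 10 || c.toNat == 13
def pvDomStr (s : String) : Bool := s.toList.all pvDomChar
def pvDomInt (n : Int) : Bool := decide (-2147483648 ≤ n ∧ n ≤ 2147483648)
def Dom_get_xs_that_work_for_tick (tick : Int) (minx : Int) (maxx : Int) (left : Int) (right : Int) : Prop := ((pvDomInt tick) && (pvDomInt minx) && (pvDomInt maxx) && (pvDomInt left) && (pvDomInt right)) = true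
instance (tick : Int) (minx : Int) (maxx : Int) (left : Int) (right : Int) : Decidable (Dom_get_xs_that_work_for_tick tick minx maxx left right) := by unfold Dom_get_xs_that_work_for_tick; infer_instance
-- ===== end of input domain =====

-- B replaces A's per-velocity tick-step simulation by a closed-form (triangular-sum) x position per initial velocity.

-- ===== PORT A =====
-- literal transliteration: outer loop over range(minx, maxx+1), inner loop simulating tick steps
def get_xs_that_work_for_tick (tick : Int) (minx : Int) (maxx : Int) (left : Int) (right : Int) : List Int :=
  (PySem.List.pyRange minx (maxx + 1) 1).foldl
    (fun answer init_x =>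
      let s := (PySem.List.pyRange 0 tick 1).foldl
        (fun (st : Int × Int) _ => (st.1 + st.2, max 0 (st.2 - 1))) (0, init_x)
      if left ≤ s.1 ∧ s.1 ≤ right then answer ++ [init_x] else answer)
    []

-- ===== PORT B =====
-- closed-form x position after `tick` steps starting with velocity v (Source B's xpos)
def pvXpos (tick : Int) (v : Int) : Int :=
  if tick ≤ 0 then 0
  else if v ≤ 0 then v
  else if tick ≤ v then tick * v - PySem.Int.floordiv (tick * (tick - 1)) 2
  else PySem.Int.floordiv (v * (v + 1)) 2

def get_xs_that_work_for_tick_alt (tick : Int) (minx : Int) (maxx : Int) (left : Int) (right : Int) : List Int :=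
  (PySem.List.pyRange minx (maxx + 1) 1).filter
    (fun v => decide (left ≤ pvXpos tick v) && decide (pvXpos tick v ≤ right))

-- ===== PRECONDITION & SPEC =====
def Spec_get_xs_that_work_for_tick (tick : Int) (minx : Int) (maxx : Int) (left : Int) (right : Int) (out : List Int) : Prop := out = get_xs_that_work_for_tick_alt tick minx maxx left right
instance (tick : Int) (minx : Int) (maxx : Int) (left : Int) (right : Int) (out : List Int) : Decidable (Spec_get_xs_that_work_for_tick tick minx maxx left right out) := by unfold Spec_get_xs_that_work_for_tick; infer_instance

-- ===== CLAIM (what is proved, stated in full; the proofs are below) =====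
def Claim_equal_get_xs_that_work_for_tick : Prop := ∀ (tick : Int) (minx : Int) (maxx : Int) (left : Int) (right : Int), Dom_get_xs_that_work_for_tick tick minx maxx left right → Spec_get_xs_that_work_for_tick tick minx maxx left right (get_xs_that_work_for_tick tick minx maxx left right)

-- ===== LEMMAS AND PROOFS =====

-- n applications of A's inner-loop step
def pvIter : Nat → Int × Int → Int × Int
  | 0, s => s
  | n+1, s => pvIter n (s.1 + s.2, max 0 (s.2 - 1))

-- twice the closed-form position, division-free
def pvG (n : Nat) (w : Int) : Int :=
  if n = 0 then 0 else if w ≤ 0 then 2*w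
  else if (n : Int) ≤ w then 2*n*w - n*(n-1) else w*(w+1)

lemma pv_foldl_iter (l : List Int) (s : Int × Int) :
    l.foldl (fun (st : Int × Int) _ => (st.1 + st.2, max 0 (st.2 - 1))) s = pvIter l.length s := by
  induction l generalizing s with
  | nil => rfl
  | cons a t ih => simp [List.foldl, pvIter, ih]

lemma pvG_step (n : Nat) (w : Int) : pvG (n+1) w = 2*w + pvG n (max 0 (w - 1)) := by
  rcases le_or_gt w 0 with hw | hw
  · have hmax : max 0 (w - 1) = 0 := by omega
    rw [hmax]
    rcases Nat.eq_zero_or_pos n with hn | hn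
    · simp [pvG, hn, hw]
    · simp [pvG, Nat.pos_iff_ne_zero.mp hn, hw]
  · have hmax : max 0 (w - 1) = w - 1 := by omega
    rw [hmax]
    rcases Nat.eq_zero_or_pos n with hn | hn
    · subst hn
      have h1 : (1 : Int) ≤ w := hw
      simp only [pvG, if_neg (by omega : ¬ (0+1 = 0)), if_neg (by omega : ¬ w ≤ 0),
        if_pos (by push_cast; omega : ((0+1 : Nat) : Int) ≤ w)]
      push_cast; ring
    · have hn' : n ≠ 0 := Nat.pos_iff_ne_zero.mp hn
      by_cases h1 : w - 1 ≤ 0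
      · -- w = 1
        have hw1 : w = 1 := by omega
        subst hw1
        simp only [pvG, if_neg (by omega : ¬ (n+1 = 0)), hn', if_neg (by omega : ¬ (1:Int) ≤ 0)]
        have : ¬ ((n+1 : Nat) : Int) ≤ 1 := by push_cast; omega
        rw [if_neg this]; simp
      · by_cases h2 : (n : Int) ≤ w - 1
        · have ha : ((n+1 : Nat) : Int) ≤ w := by push_cast; omega
          simp only [pvG, if_neg (by omega : ¬ (n+1 = 0)), hn', if_neg (by omega : ¬ w ≤ 0),
            if_pos ha, if_false, if_neg h1, if_pos h2]
          push_cast; ring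
        · have ha : ¬ ((n+1 : Nat) : Int) ≤ w := by push_cast; omega
          simp only [pvG, if_neg (by omega : ¬ (n+1 = 0)), hn', if_neg (by omega : ¬ w ≤ 0),
            if_neg ha, if_false, if_neg h1, if_neg h2]
          ring

lemma pv_iter_fst (n : Nat) (p w : Int) : 2 * (pvIter n (p, w)).1 = 2*p + pvG n w := by
  induction n generalizing p w with
  | zero => simp [pvIter, pvG]
  | succ m ih =>
    rw [pvG_step]
    have : pvIter (m+1) (p, w) = pvIter m (p + w, max 0 (w - 1)) := rfl
    rw [this, ih]; ring

lemma pv_floordiv_even (m : Int) (h : Even m) : 2 * PySem.Int.floordiv m 2 = m := by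
  obtain ⟨k, hk⟩ := h
  rw [PySem.Int.floordiv_eq_ediv_of_pos (by norm_num)]
  subst hk
  have : k + k = 2 * k := by ring
  rw [this, Int.mul_ediv_cancel_left _ (by norm_num)]

lemma pvXpos_eq_G (tick v : Int) : 2 * pvXpos tick v = pvG tick.toNat v := by
  by_cases ht : tick ≤ 0
  · have : tick.toNat = 0 := by omega
    simp [pvXpos, pvG, ht, this]
  · have hcast : ((tick.toNat : Int)) = tick := by omega
    have hne : tick.toNat ≠ 0 := by omega
    by_cases hv : v ≤ 0
    · simp [pvXpos, pvG, ht, hv, hne]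
    · by_cases h2 : tick ≤ v
      · have h2' : ((tick.toNat : Int)) ≤ v := by omega
        simp only [pvXpos, if_neg ht, if_pos h2, pvG, hne, if_false, if_neg hv, if_pos h2']
        have hev : Even (tick * (tick - 1)) := by
          have := Int.even_mul_succ_self (tick - 1)
          simpa [mul_comm, sub_add_cancel] using this
        have h3 := pv_floordiv_even _ hev
        rw [hcast]; linear_combination -h3
      · have h2' : ¬ ((tick.toNat : Int)) ≤ v := by omega
        simp only [pvXpos, if_neg ht, if_neg h2, pvG, hne, if_false, if_neg hv, if_neg h2']
        have h3 := pv_floordiv_even _ (Int.even_mul_succ_self v)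
        linear_combination h3

lemma pv_inner_eq (tick v : Int) :
    ((PySem.List.pyRange 0 tick 1).foldl
      (fun (st : Int × Int) _ => (st.1 + st.2, max 0 (st.2 - 1))) (0, v)).1 = pvXpos tick v := by
  rw [pv_foldl_iter, PySem.List.length_pyRange_one]
  have h1 := pv_iter_fst (tick - 0).toNat 0 v
  have h2 := pvXpos_eq_G tick v
  simp only [Int.sub_zero] at h1 ⊢
  omega

-- ===== VERDICT (by name: the statement is the Claim_ definition above) =====
theorem get_xs_that_work_for_tick_spec : Claim_equal_get_xs_that_work_for_tick := by
  intro tick minx maxx left right _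
  unfold Spec_get_xs_that_work_for_tick get_xs_that_work_for_tick get_xs_that_work_for_tick_alt
  simp only [pv_inner_eq]
  rw [PySem.List.foldl_append_ite_eq_filter]
  simp
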